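-- pv_equiv track=rewrite | github.com/cmiller112000/AIND-Isolation | game_agent.py | minmax_xy
-- ===== SOURCE A (Python) =====
-- def minmax_xy(moves):
--     if len(moves) == 0:
--         return -1, -1, -1, -1
--     minx = min([(move[0]) for move in moves])
--     maxx = max([(move[0]) for move in moves])
--     miny = min([(move[1]) for move in moves])
--     maxy = max([(move[1]) for move in moves])
--     return minx, maxx, miny, maxy
-- ===== SOURCE B (Python) =====
-- def minmax_xy(moves):
--     if len(moves) == 0:
--         return -1, -1, -1, -1
--     minx = maxx = moves[0][0]
--     miny = maxy = moves[0][1]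
--     for x, y in moves[1:]:
--         if x < minx: minx = x
--         if x > maxx: maxx = x
--         if y < miny: miny = y
--         if y > maxy: maxy = y
--     return minx, maxx, miny, maxy
-- ===== Notes on version B (the rewrite author's own statement) =====
-- stated objective: simpler
-- what changed: Replaces four list comprehensions plus four separate min/max scans with a single pass over the moves maintaining four running extrema.
import Mathlib
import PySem

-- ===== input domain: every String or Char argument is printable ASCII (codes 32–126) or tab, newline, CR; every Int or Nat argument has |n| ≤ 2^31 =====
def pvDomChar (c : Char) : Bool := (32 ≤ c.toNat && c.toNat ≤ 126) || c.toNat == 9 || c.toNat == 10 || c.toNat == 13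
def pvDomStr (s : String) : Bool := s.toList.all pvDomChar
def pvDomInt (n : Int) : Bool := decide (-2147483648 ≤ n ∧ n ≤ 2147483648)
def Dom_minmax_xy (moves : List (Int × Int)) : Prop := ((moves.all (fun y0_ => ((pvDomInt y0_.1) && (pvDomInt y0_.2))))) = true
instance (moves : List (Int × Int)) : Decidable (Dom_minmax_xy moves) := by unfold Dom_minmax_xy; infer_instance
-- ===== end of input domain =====

-- B replaces A's four comprehensions + four min/max scans by one pass maintaining four running extrema (objective: simpler).

-- ===== PORT A =====
-- A: guard empty, then min/max over the mapped x-list and y-list (four scans).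
-- The .getD 0 only totalises min?/max?: under the guard the lists are nonempty, so it never fires.
def minmax_xy (moves : List (Int × Int)) : Int × Int × Int × Int :=
  if moves.length = 0 then (-1, -1, -1, -1)
  else
    let minx := (PySem.List.min? (moves.map (fun move => move.1)) (fun x => x)).getD 0
    let maxx := (PySem.List.max? (moves.map (fun move => move.1)) (fun x => x)).getD 0
    let miny := (PySem.List.min? (moves.map (fun move => move.2)) (fun x => x)).getD 0
    let maxy := (PySem.List.max? (moves.map (fun move => move.2)) (fun x => x)).getD 0
    (minx, maxx, miny, maxy)

-- ===== PORT B =====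
-- B: single fold over the tail with four running extrema seeded from the head.
def minmax_xy_alt (moves : List (Int × Int)) : Int × Int × Int × Int :=
  match moves with
  | [] => (-1, -1, -1, -1)
  | (x0, y0) :: rest =>
    rest.foldl
      (fun s p =>
        (if p.1 < s.1 then p.1 else s.1,
         if p.1 > s.2.1 then p.1 else s.2.1,
         if p.2 < s.2.2.1 then p.2 else s.2.2.1,
         if p.2 > s.2.2.2 then p.2 else s.2.2.2))
      (x0, x0, y0, y0)

-- ===== PRECONDITION & SPEC =====
def Spec_minmax_xy (moves : List (Int × Int)) (out : Int × Int × Int × Int) : Prop := out = minmax_xy_alt moves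
instance (moves : List (Int × Int)) (out : Int × Int × Int × Int) : Decidable (Spec_minmax_xy moves out) := by unfold Spec_minmax_xy; infer_instance

-- ===== CLAIM (what is proved, stated in full; the proofs are below) =====
def Claim_equal_minmax_xy : Prop := ∀ (moves : List (Int × Int)), Dom_minmax_xy moves → Spec_minmax_xy moves (minmax_xy moves)

-- ===== LEMMAS AND PROOFS =====

theorem pv_fold4 (rest : List (Int × Int)) (a b c d : Int) :
    rest.foldl
      (fun s p =>
        (if p.1 < s.1 then p.1 else s.1,
         if p.1 > s.2.1 then p.1 else s.2.1,
         if p.2 < s.2.2.1 then p.2 else s.2.2.1,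
         if p.2 > s.2.2.2 then p.2 else s.2.2.2))
      (a, b, c, d)
    = ((rest.map Prod.fst).foldl min a,
       (rest.map Prod.fst).foldl max b,
       (rest.map Prod.snd).foldl min c,
       (rest.map Prod.snd).foldl max d) := by
  induction rest generalizing a b c d with
  | nil => simp
  | cons p t ih =>
    simp only [List.foldl_cons, List.map_cons, ih]
    have h1 : (if p.1 < a then p.1 else a) = min a p.1 := by omega
    have h2 : (if p.1 > b then p.1 else b) = max b p.1 := by omega
    have h3 : (if p.2 < c then p.2 else c) = min c p.2 := by omega
    have h4 : (if p.2 > d then p.2 else d) = max d p.2 := by omega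
    rw [h1, h2, h3, h4]

theorem minmax_xy_spec : Claim_equal_minmax_xy := by
  intro moves _
  unfold Spec_minmax_xy minmax_xy minmax_xy_alt
  match moves with
  | [] => rfl
  | (x0, y0) :: rest =>
    simp only [List.length_cons, Nat.succ_ne_zero, pv_fold4, List.map_cons,
      PySem.List.min?_id_cons, PySem.List.max?_id_cons, Option.getD_some]
    rfl
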